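-- pv_equiv track=rewrite | github.com/Massprod/leetcode-testing | leetcode_problems/p3852_smallest_pair_with_different_frequencies.py | min_distinct_freq_pair
-- ===== SOURCE A (Python) =====
-- from collections import Counter
--
-- def min_distinct_freq_pair(nums: list[int]) -> list[int]:
--     # working_solution: (100%, 88.86%) -> (0ms, 19.30mb)  Time: O(n * log n) Space: O(n)
--     out: list[int] = [-1, -1]
--
--     counts: dict[int, int] = Counter(nums)
--     sorted_counts: list[int] = sorted(counts.keys())
--     first_val: int = sorted_counts[0]
--     first_occurs: int = counts[first_val]
--     for index in range(1, len(sorted_counts)):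
--         second_val: int = sorted_counts[index]
--         if not (first_val < second_val):
--             continue
--         second_occurs: int = counts[second_val]
--         if first_occurs == second_occurs:
--             continue
--         out = [first_val, second_val]
--         break
--
--     return out
-- ===== SOURCE B (Python) =====
-- from collections import Counter
--
--
-- def min_distinct_freq_pair(nums: list[int]) -> list[int]:
--     # No sort: one hash pass, then pick the minimum qualifying value directly.
--     counts = Counter(nums)
--     first = min(counts)
--     first_count = counts[first]
--     candidates = [v for v, c in counts.items() if v > first and c != first_count]
--     second = min(candidates, default=None)
--     return [-1, -1] if second is None else [first, second]
-- ===== Notes on version B (the rewrite author's own statement) =====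
-- stated objective: alternative
-- what changed: B drops the sort entirely: it builds the Counter, takes the minimum key, and picks the minimum key whose count differs via a single filtered min over the hash items, instead of sorting the distinct keys and scanning for the first match.
-- outside the precondition, e.g. on min_distinct_freq_pair([]): A raises IndexError, B raises ValueError
import Mathlib
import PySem

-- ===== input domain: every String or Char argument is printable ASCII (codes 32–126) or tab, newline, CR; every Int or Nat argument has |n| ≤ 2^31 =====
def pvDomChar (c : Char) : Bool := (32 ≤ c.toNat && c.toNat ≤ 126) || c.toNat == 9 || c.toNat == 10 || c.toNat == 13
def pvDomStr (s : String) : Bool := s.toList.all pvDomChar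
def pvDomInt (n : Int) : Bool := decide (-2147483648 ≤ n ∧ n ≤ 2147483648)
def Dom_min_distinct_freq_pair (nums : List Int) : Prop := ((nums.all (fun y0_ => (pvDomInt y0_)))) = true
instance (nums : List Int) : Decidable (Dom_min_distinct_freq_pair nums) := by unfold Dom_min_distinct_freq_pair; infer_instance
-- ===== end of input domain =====

-- B replaces A's sort-then-scan by a hash pass and two filtered minima (alternative algorithm, same results).

-- ===== PORT A =====
-- A's 'for index in range(1, len(sorted_counts))' loop with its two continues and the break
def aScan (counts : PySem.Dict Int Int) (sorted_counts : List Int)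
    (first_val first_occurs : Int) : List Int → List Int
  | [] => [-1, -1]
  | index :: rest =>
      let second_val : Int := PySem.List.pyGetD sorted_counts index 0
      if ¬ (first_val < second_val) then
        aScan counts sorted_counts first_val first_occurs rest
      else
        let second_occurs : Int := counts.getD second_val 0
        if first_occurs = second_occurs then
          aScan counts sorted_counts first_val first_occurs rest
        else [first_val, second_val]

def min_distinct_freq_pair (nums : List Int) : List Int :=
  let counts : PySem.Dict Int Int := PySem.Dict.counter nums
  let sorted_counts : List Int := PySem.List.sorted counts.keys (fun x => x) false
  let first_val : Int := PySem.List.pyGetD sorted_counts 0 0   -- sorted_counts[0]; in range under Pre_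
  let first_occurs : Int := counts.getD first_val 0
  aScan counts sorted_counts first_val first_occurs
    (PySem.List.pyRange 1 (sorted_counts.length : Int) 1)

-- ===== PORT B =====
def min_distinct_freq_pair_alt (nums : List Int) : List Int :=
  let counts : PySem.Dict Int Int := PySem.Dict.counter nums
  match PySem.List.min? counts.keys (fun x => x) with   -- min(counts); empty dict raises, outside Pre_
  | none => [-1, -1]
  | some first =>
    let first_count : Int := counts.getD first 0
    let candidates : List Int :=
      (counts.items.filter (fun p => decide (first < p.1 ∧ p.2 ≠ first_count))).map (·.1)
    match PySem.List.min? candidates (fun x => x) with  -- min(candidates, default=None)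
    | none => [-1, -1]
    | some second => [first, second]

-- ===== PRECONDITION & SPEC =====
-- A raises IndexError on [] (sorted_counts[0]); B's Python raises ValueError there (min of empty dict).
def Pre_min_distinct_freq_pair (nums : List Int) : Prop := nums ≠ []
instance (nums : List Int) : Decidable (Pre_min_distinct_freq_pair nums) := by
  unfold Pre_min_distinct_freq_pair; infer_instance

def pvWitness_min_distinct_freq_pair : List Int := [1, 1, 2]

def Spec_min_distinct_freq_pair (nums : List Int) (out : List Int) : Prop :=
  out = min_distinct_freq_pair_alt nums
instance (nums : List Int) (out : List Int) : Decidable (Spec_min_distinct_freq_pair nums out) := by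
  unfold Spec_min_distinct_freq_pair; infer_instance

-- ===== CLAIM (what is proved, stated in full; the proofs are below) =====
def Claim_equal_min_distinct_freq_pair : Prop :=
  ∀ (nums : List Int), Dom_min_distinct_freq_pair nums → Pre_min_distinct_freq_pair nums →
    Spec_min_distinct_freq_pair nums (min_distinct_freq_pair nums)

-- ===== LEMMAS AND PROOFS =====

-- A's index loop over range(1, len) read as a scan over the values of the tail of the sorted list
def vScan (counts : PySem.Dict Int Int) (first_val first_occurs : Int) : List Int → List Int
  | [] => [-1, -1]
  | v :: rest =>
      if ¬ (first_val < v) then vScan counts first_val first_occurs rest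
      else if first_occurs = counts.getD v 0 then vScan counts first_val first_occurs rest
      else [first_val, v]

lemma aScan_eq_vScan (counts : PySem.Dict Int Int) (l : List Int) (fv fo : Int) :
    ∀ (n j : Nat), j + n = l.length →
      aScan counts l fv fo (PySem.List.pyRange (j : Int) (l.length : Int) 1) =
        vScan counts fv fo (l.drop j) := by
  intro n
  induction n with
  | zero =>
      intro j hj
      rw [PySem.List.pyRange_one_eq_nil (by omega)]
      rw [List.drop_of_length_le (by omega)]
      rfl
  | succ n ih =>
      intro j hj
      have hjlt : j < l.length := by omega
      rw [PySem.List.pyRange_one_cons (by exact_mod_cast hjlt)]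
      have hdrop : l.drop j = l[j] :: l.drop (j + 1) := List.drop_eq_getElem_cons hjlt
      have hget : PySem.List.pyGetD l (j : Int) 0 = l[j] := PySem.List.pyGetD_ofNat l j 0 hjlt
      have hrest : ((j : Int) + 1) = ((j + 1 : Nat) : Int) := by push_cast; ring
      rw [hdrop]
      simp only [aScan, vScan, hget, hrest]
      rw [ih (j + 1) (by omega)]

lemma vScan_all_gt (counts : PySem.Dict Int Int) (fv fo : Int) (t : List Int)
    (h : ∀ v ∈ t, fv < v) :
    vScan counts fv fo t =
      match (t.filter (fun v => decide (¬ fo = counts.getD v 0))).head? with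
      | none => [-1, -1]
      | some v => [fv, v] := by
  induction t with
  | nil => rfl
  | cons v rest ih =>
      have hv : fv < v := h v (List.mem_cons_self)
      by_cases hc : fo = counts.getD v 0
      · have e1 : vScan counts fv fo (v :: rest) = vScan counts fv fo rest := by
          simp [vScan, hv, hc]
        have e2 : (v :: rest).filter (fun w => decide (¬ fo = counts.getD w 0)) =
            rest.filter (fun w => decide (¬ fo = counts.getD w 0)) := by simp [hc]
        rw [e1, e2]
        exact ih (fun w hw => h w (List.mem_cons_of_mem _ hw))
      · have e1 : vScan counts fv fo (v :: rest) = [fv, v] := by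
          simp [vScan, hv, hc]
        have e2 : (v :: rest).filter (fun w => decide (¬ fo = counts.getD w 0)) =
            v :: rest.filter (fun w => decide (¬ fo = counts.getD w 0)) := by simp [hc]
        rw [e1, e2]
        rfl

-- head of a (·<·)-pairwise list is its unique minimum
lemma head_pairwise_min {l : List Int} {v : Int} (hp : l.Pairwise (· < ·))
    (hh : l.head? = some v) : v ∈ l ∧ ∀ w ∈ l, v ≤ w := by
  cases l with
  | nil => simp at hh
  | cons a rest =>
      simp only [List.head?_cons, Option.some.injEq] at hh
      subst hh
      refine ⟨List.mem_cons_self, ?_⟩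
      intro w hw
      rcases List.mem_cons.mp hw with h | h
      · omega
      · exact le_of_lt ((List.pairwise_cons.mp hp).1 w h)

-- ===== VERDICT (by name: the statement is the Claim_ definition above) =====
theorem min_distinct_freq_pair_spec : Claim_equal_min_distinct_freq_pair := by
  intro nums _ hpre
  unfold Spec_min_distinct_freq_pair min_distinct_freq_pair min_distinct_freq_pair_alt
  dsimp only
  set counts := PySem.Dict.counter nums with hcounts
  set sorted_counts := PySem.List.sorted counts.keys (fun x => x) false with hsorted
  -- sorted list is nonempty
  have hkeys : counts.keys = PySem.Set.ofList nums := PySem.Dict.keys_counter nums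
  have hnodup : counts.keys.Nodup := PySem.Dict.nodup_keys_counter nums
  have hsne : sorted_counts ≠ [] := by
    rw [hsorted, Ne, PySem.List.sorted_eq_nil_iff, hkeys]
    intro hnil
    cases nums with
    | nil => exact hpre rfl
    | cons x xs =>
        have : x ∈ PySem.Set.ofList (x :: xs) := by
          rw [PySem.Set.mem_ofList]; exact List.mem_cons_self
        simp [hnil] at this
  obtain ⟨m, t, hmt⟩ := List.exists_cons_of_ne_nil hsne
  have hperm : sorted_counts.Perm counts.keys := PySem.List.sorted_perm _ _ _
  have hpw : sorted_counts.Pairwise (· < ·) := by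
    rw [hsorted, hkeys]; exact PySem.List.sorted_ofList_pairwise_lt nums
  have hfv : PySem.List.pyGetD sorted_counts 0 0 = m := by
    rw [hmt]; exact PySem.List.pyGetD_zero_cons _ _ _
  -- A side: reduce the index loop to vScan over t
  have hA : aScan counts sorted_counts m (counts.getD m 0)
      (PySem.List.pyRange 1 (sorted_counts.length : Int) 1) =
      vScan counts m (counts.getD m 0) t := by
    have h1 : ((1 : Nat) : Int) = (1 : Int) := rfl
    have := aScan_eq_vScan counts sorted_counts m (counts.getD m 0)
      (sorted_counts.length - 1) 1 (by rw [hmt]; simp only [List.length_cons]; omega)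
    rw [h1] at this
    rw [this, hmt, List.drop_one, List.tail_cons]
  -- the minimum key equals m
  have hmmem : m ∈ counts.keys := hperm.mem_iff.mp (by rw [hmt]; exact List.mem_cons_self)
  have hmle : ∀ y ∈ counts.keys, m ≤ y := by
    intro y hy
    exact PySem.List.key_head_sorted_le counts.keys (fun x => x) hmt y hy
  have hmin : PySem.List.min? counts.keys (fun x => x) = some m := by
    cases hmin' : PySem.List.min? counts.keys (fun x => x) with
    | none =>
        rw [PySem.List.min?_eq_none_iff] at hmin'
        rw [hmin'] at hmmem; simp at hmmem
    | some w =>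
        have hw1 := PySem.List.min?_mem hmin'
        have hw2 := PySem.List.min?_isMin hmin'
        have : w = m := le_antisymm (hw2 m hmmem) (hmle w hw1)
        rw [this]
  rw [hfv, hA, hmin]
  dsimp only
  -- B side: candidates = keys filtered
  have hitems : counts.items = counts.keys.map (fun k => (k, counts.getD k 0)) :=
    PySem.Dict.items_eq_map_keys counts hnodup 0
  have hcand :
      (counts.items.filter (fun p => decide (m < p.1 ∧ p.2 ≠ counts.getD m 0))).map (·.1) =
      counts.keys.filter (fun k => decide (m < k ∧ counts.getD k 0 ≠ counts.getD m 0)) := by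
    rw [hitems, List.filter_map, List.map_map]
    simp [Function.comp_def]
  rw [hcand]
  -- the two filtered lists are permutations of each other
  have htall : ∀ v ∈ t, m < v := by
    have := hpw; rw [hmt, List.pairwise_cons] at this; exact this.1
  have hfilt :
      (counts.keys.filter (fun k => decide (m < k ∧ counts.getD k 0 ≠ counts.getD m 0))).Perm
        (t.filter (fun v => decide (¬ counts.getD m 0 = counts.getD v 0))) := by
    have hp2 : (sorted_counts.filter
        (fun k => decide (m < k ∧ counts.getD k 0 ≠ counts.getD m 0))).Perm
        (counts.keys.filter (fun k => decide (m < k ∧ counts.getD k 0 ≠ counts.getD m 0))) :=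
      hperm.filter _
    refine hp2.symm.trans ?_
    rw [hmt]
    have hhead : (List.filter (fun k => decide (m < k ∧ counts.getD k 0 ≠ counts.getD m 0))
        (m :: t)) = t.filter (fun k => decide (m < k ∧ counts.getD k 0 ≠ counts.getD m 0)) := by
      simp
    rw [hhead]
    have : t.filter (fun k => decide (m < k ∧ counts.getD k 0 ≠ counts.getD m 0)) =
        t.filter (fun v => decide (¬ counts.getD m 0 = counts.getD v 0)) := by
      apply List.filter_congr
      intro v hv
      have := htall v hv
      simp only [decide_eq_decide]
      constructor
      · rintro ⟨_, h2⟩ h3; exact h2 h3.symm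
      · intro h; exact ⟨this, fun h2 => h h2.symm⟩
    rw [this]
  -- filtered tail inherits pairwise <
  have hpwt : (t.filter (fun v => decide (¬ counts.getD m 0 = counts.getD v 0))).Pairwise (· < ·) := by
    have : t.Pairwise (· < ·) := by
      have := hpw; rw [hmt, List.pairwise_cons] at this; exact this.2
    exact this.filter _
  rw [vScan_all_gt counts m (counts.getD m 0) t htall]
  -- finish by case analysis on the head of the filtered tail
  cases hh : (t.filter (fun v => decide (¬ counts.getD m 0 = counts.getD v 0))).head? with
  | none =>
      have hnil : t.filter (fun v => decide (¬ counts.getD m 0 = counts.getD v 0)) = [] :=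
        List.head?_eq_none_iff.mp hh
      have : counts.keys.filter (fun k => decide (m < k ∧ counts.getD k 0 ≠ counts.getD m 0)) = [] :=
        List.Perm.eq_nil (hnil ▸ hfilt)
      rw [this]
      simp [PySem.List.min?]
  | some v =>
      obtain ⟨hvmem, hvle⟩ := head_pairwise_min hpwt hh
      have hvmem' : v ∈ counts.keys.filter
          (fun k => decide (m < k ∧ counts.getD k 0 ≠ counts.getD m 0)) :=
        hfilt.mem_iff.mpr hvmem
      have hvle' : ∀ w ∈ counts.keys.filter
          (fun k => decide (m < k ∧ counts.getD k 0 ≠ counts.getD m 0)), v ≤ w := by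
        intro w hw; exact hvle w (hfilt.mem_iff.mp hw)
      cases hmin2 : PySem.List.min? (counts.keys.filter
          (fun k => decide (m < k ∧ counts.getD k 0 ≠ counts.getD m 0))) (fun x => x) with
      | none =>
          rw [PySem.List.min?_eq_none_iff] at hmin2
          rw [hmin2] at hvmem'; simp at hvmem'
      | some w =>
          have hw1 := PySem.List.min?_mem hmin2
          have hw2 := PySem.List.min?_isMin hmin2
          have : v = w := le_antisymm (hvle' w hw1) (hw2 v hvmem')
          rw [← this]
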